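-- pv_equiv track=rewrite | github.com/CreatechStudio/Acceleration-Rules | migrate.py | resolve_target_file_name
-- ===== SOURCE A (Python) =====
-- def resolve_target_file_name(search_key: str, parsed_name: str | None, stems: dict[str, str]) -> str | None:
--     if parsed_name:
--         return parsed_name
--
--     candidates = [stem for stem in stems if search_key == stem or search_key.endswith(stem)]
--     if not candidates:
--         return None
--
--     best_stem = max(candidates, key=len)
--     return stems[best_stem]
-- ===== SOURCE B (Python) =====
-- def resolve_target_file_name(search_key: str, parsed_name: str | None, stems: dict[str, str]) -> str | None:
--     if parsed_name:
--         return parsed_name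
--
--     # longest suffix first: the first suffix of search_key found in stems is the longest match
--     for i in range(len(search_key) + 1):
--         suffix = search_key[i:]
--         if suffix in stems:
--             return stems[suffix]
--     return None
-- ===== Notes on version B (the rewrite author's own statement) =====
-- stated objective: simpler
-- what changed: Instead of filtering every stem for the suffix property and taking max(..., key=len), B scans the suffixes of search_key from longest to shortest and returns the mapping of the first one present in stems (dict membership), so no candidate list and no max pass.
import Mathlib
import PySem

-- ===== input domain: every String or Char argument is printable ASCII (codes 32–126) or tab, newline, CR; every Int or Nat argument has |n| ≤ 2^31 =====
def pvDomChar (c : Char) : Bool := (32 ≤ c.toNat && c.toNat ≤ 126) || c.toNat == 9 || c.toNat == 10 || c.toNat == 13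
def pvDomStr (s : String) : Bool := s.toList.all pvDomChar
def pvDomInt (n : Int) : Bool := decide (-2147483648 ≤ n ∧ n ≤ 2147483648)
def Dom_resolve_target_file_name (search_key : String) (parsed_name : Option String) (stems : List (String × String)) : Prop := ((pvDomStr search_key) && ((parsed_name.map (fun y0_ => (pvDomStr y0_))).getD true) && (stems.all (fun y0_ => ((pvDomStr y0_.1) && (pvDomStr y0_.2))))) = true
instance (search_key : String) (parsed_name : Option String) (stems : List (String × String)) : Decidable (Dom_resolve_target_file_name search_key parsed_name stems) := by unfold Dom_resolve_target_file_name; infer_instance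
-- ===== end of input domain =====

-- B replaces A's filter-all-stems + max(..., key=len) with a scan of search_key's suffixes
-- from longest to shortest, returning the first one present in stems (objective: simpler).

-- ===== PORT A =====
-- candidates = [stem for stem in stems if search_key == stem or search_key.endswith(stem)];
-- if not candidates: return None; best = max(candidates, key=len); return stems[best]
def pvAcore (search_key : String) (stems : List (String × String)) : Option String :=
  let d := PySem.Dict.ofList stems
  let candidates := (PySem.Dict.keys d).filter
    (fun stem => (search_key == stem) || PySem.Str.endswith search_key stem)
  if candidates = [] then none
  else
    match PySem.List.max? candidates (fun s => PySem.Str.len s) with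
    | some best_stem => PySem.Dict.get? d best_stem   -- stems[best_stem] (key always present)
    | none => none

def resolve_target_file_name (search_key : String) (parsed_name : Option String) (stems : List (String × String)) : Option String :=
  match parsed_name with
  | some s => if s = "" then pvAcore search_key stems else some s   -- `if parsed_name:` truthiness
  | none => pvAcore search_key stems

-- ===== PORT B =====
-- for i in range(len(search_key)+1): suffix = search_key[i:]; if suffix in stems: return stems[suffix]
def pvBloop (d : PySem.Dict String String) (search_key : String) : List Int → Option String
  | [] => none
  | i :: rest =>   -- suffix = search_key[i:]
    if PySem.Dict.contains d (PySem.Str.slice search_key (some i) none) then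
      PySem.Dict.get? d (PySem.Str.slice search_key (some i) none)
    else pvBloop d search_key rest

def pvBcore (search_key : String) (stems : List (String × String)) : Option String :=
  pvBloop (PySem.Dict.ofList stems) search_key
    (PySem.List.pyRange 0 (PySem.Str.len search_key + 1) 1)

def resolve_target_file_name_alt (search_key : String) (parsed_name : Option String) (stems : List (String × String)) : Option String :=
  match parsed_name with
  | some s => if s = "" then pvBcore search_key stems else some s
  | none => pvBcore search_key stems

-- ===== PRECONDITION & SPEC =====
def Spec_resolve_target_file_name (search_key : String) (parsed_name : Option String) (stems : List (String × String)) (out : Option String) : Prop := out = resolve_target_file_name_alt search_key parsed_name stems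
instance (search_key : String) (parsed_name : Option String) (stems : List (String × String)) (out : Option String) : Decidable (Spec_resolve_target_file_name search_key parsed_name stems out) := by unfold Spec_resolve_target_file_name; infer_instance

-- ===== CLAIM (what is proved, stated in full; the proofs are below) =====
def Claim_equal_resolve_target_file_name : Prop := ∀ (search_key : String) (parsed_name : Option String) (stems : List (String × String)), Dom_resolve_target_file_name search_key parsed_name stems → Spec_resolve_target_file_name search_key parsed_name stems (resolve_target_file_name search_key parsed_name stems)

-- ===== LEMMAS AND PROOFS =====

-- the suffix string search_key[i:] for a natural i
def pvSfx (search_key : String) (i : Nat) : String :=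
  PySem.Str.slice search_key (some (i : Int)) none

theorem pvSfx_toList (sk : String) (i : Nat) :
    (pvSfx sk i).toList = sk.toList.drop i := by
  simp [pvSfx, PySem.List.slice_from_natCast]

-- the filter predicate holds iff stem is a suffix of search_key
theorem pvPred_iff (sk stem : String) :
    (((sk == stem) || PySem.Str.endswith sk stem) = true) ↔ stem.toList <:+ sk.toList := by
  have he := PySem.Chars.endswith_iff (sk.toList) (stem.toList)
  constructor
  · intro h
    rcases (by simpa using h : sk = stem ∨ PySem.Chars.endswith sk.toList stem.toList = true) with h | h
    · cases h; exact List.suffix_refl _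
    · exact he.mp h
  · intro h
    have : PySem.Chars.endswith sk.toList stem.toList = true := he.mpr h
    simp [PySem.Str.endswith, this]

-- a suffix is the drop at (length - its length)
theorem pvSuffix_eq_drop {l cs : List Char} (h : l <:+ cs) :
    l.length ≤ cs.length ∧ l = cs.drop (cs.length - l.length) := by
  obtain ⟨t, rfl⟩ := h
  constructor
  · simp
  · simp

-- if no suffix of sk is a key, the scan returns none
theorem pvLoop_none (d : PySem.Dict String String) (sk : String)
    (h : ∀ j : Nat, j ≤ sk.toList.length → d.contains (pvSfx sk j) = false) :
    ∀ i : Nat, pvBloop d sk (PySem.List.pyRange (i : Int) ((sk.toList.length : Int) + 1) 1) = none := by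
  intro i
  by_cases hi : i ≤ sk.toList.length
  · induction hn : sk.toList.length + 1 - i generalizing i with
    | zero => omega
    | succ m ih =>
      rw [PySem.List.pyRange_one_cons (by omega : (i:Int) < (sk.toList.length : Int) + 1)]
      unfold pvBloop
      rw [show PySem.Str.slice sk (some ((i:Nat):Int)) none = pvSfx sk i from rfl]
      rw [h i hi]
      rw [if_neg Bool.false_ne_true]
      by_cases hi' : i + 1 ≤ sk.toList.length
      · have := ih (i+1) hi' (by omega)
        rw [show ((i:Int) + 1) = (((i+1:Nat)):Int) by push_cast; ring]
        exact this
      · rw [show ((i:Int) + 1) = (((i+1:Nat)):Int) by push_cast; ring]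
        rw [PySem.List.pyRange_one_eq_nil (by push_cast; omega)]
        rfl
  · rw [PySem.List.pyRange_one_eq_nil (by omega)]
    rfl

-- if sfx i0 is the first suffix that is a key, the scan returns its value
theorem pvLoop_found (d : PySem.Dict String String) (sk : String) (i0 : Nat)
    (h0 : i0 ≤ sk.toList.length)
    (ha : ∀ j : Nat, j < i0 → d.contains (pvSfx sk j) = false)
    (hb : d.contains (pvSfx sk i0) = true) :
    ∀ i : Nat, i ≤ i0 → pvBloop d sk (PySem.List.pyRange (i : Int) ((sk.toList.length : Int) + 1) 1) = d.get? (pvSfx sk i0) := by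
  intro i hi
  induction hn : i0 - i generalizing i with
  | zero =>
    have : i = i0 := by omega
    subst this
    rw [PySem.List.pyRange_one_cons (by omega : (i:Int) < (sk.toList.length : Int) + 1)]
    unfold pvBloop
    rw [show PySem.Str.slice sk (some ((i:Nat):Int)) none = pvSfx sk i from rfl]
    rw [hb]
    simp
  | succ m ih =>
    rw [PySem.List.pyRange_one_cons (by omega : (i:Int) < (sk.toList.length : Int) + 1)]
    unfold pvBloop
    rw [show PySem.Str.slice sk (some ((i:Nat):Int)) none = pvSfx sk i from rfl]
    rw [ha i (by omega)]
    rw [if_neg Bool.false_ne_true]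
    rw [show ((i:Int) + 1) = (((i+1:Nat)):Int) by push_cast; ring]
    exact ih (i+1) (by omega) (by omega)

theorem pvMain (sk : String) (stems : List (String × String)) :
    pvAcore sk stems = pvBcore sk stems := by
  classical
  set d := PySem.Dict.ofList stems with hd
  set cs := sk.toList with hcs
  set n := cs.length with hn
  set candidates := (PySem.Dict.keys d).filter
    (fun stem => (sk == stem) || PySem.Str.endswith sk stem) with hcand
  have hmem : ∀ stem : String, stem ∈ candidates ↔ stem ∈ d.keys ∧ stem.toList <:+ cs := by
    intro stem
    rw [hcand, List.mem_filter]
    constructor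
    · rintro ⟨h1, h2⟩; exact ⟨h1, (pvPred_iff sk stem).mp h2⟩
    · rintro ⟨h1, h2⟩; exact ⟨h1, (pvPred_iff sk stem).mpr h2⟩
  have hlenB : PySem.Str.len sk = (n : Int) := by
    simp [hn, hcs]
  have hrange : pvBcore sk stems = pvBloop d sk (PySem.List.pyRange ((0:Nat) : Int) ((n : Int) + 1) 1) := by
    unfold pvBcore
    rw [hlenB]
    rfl
  have hsfx_len : ∀ j : Nat, (pvSfx sk j).toList.length = n - j := by
    intro j; rw [pvSfx_toList]; simp [hn, hcs]
  by_cases hc : candidates = []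
  · -- A returns none; no suffix is a key, so B's scan also returns none
    have hnone : ∀ j : Nat, j ≤ n → d.contains (pvSfx sk j) = false := by
      intro j hj
      by_contra hcontra
      have hct : d.contains (pvSfx sk j) = true := by
        cases h : d.contains (pvSfx sk j) with
        | false => exact absurd h hcontra
        | true => rfl
      have hk : pvSfx sk j ∈ d.keys := (PySem.Dict.contains_iff_mem_keys d _).mp hct
      have hsuf : (pvSfx sk j).toList <:+ cs := by
        rw [pvSfx_toList]; exact List.drop_suffix _ _
      have : pvSfx sk j ∈ candidates := (hmem _).mpr ⟨hk, hsuf⟩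
      rw [hc] at this; exact absurd this (List.not_mem_nil)
    rw [hrange, pvLoop_none d sk hnone 0]
    unfold pvAcore
    simp only [← hd, ← hcand, if_pos hc]
  · -- A returns the longest candidate's value; B stops at exactly that suffix
    obtain ⟨best, hbest⟩ : ∃ b, PySem.List.max? candidates (fun s => PySem.Str.len s) = some b := by
      cases h : PySem.List.max? candidates (fun s => PySem.Str.len s) with
      | none => exact absurd ((PySem.List.max?_eq_none_iff _ _).mp h) hc
      | some b => exact ⟨b, rfl⟩
    have hbmem := PySem.List.max?_mem hbest
    have hbmax := PySem.List.max?_isMax hbest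
    obtain ⟨hbk, hbs⟩ := (hmem best).mp hbmem
    obtain ⟨hble, hbdrop⟩ := pvSuffix_eq_drop hbs
    set lb := best.toList.length with hlb
    set i0 := n - lb with hi0
    have hsfx_best : pvSfx sk i0 = best := by
      apply String.toList_inj.mp
      rw [pvSfx_toList, hbdrop]
    have hlen_s : ∀ s : String, PySem.Str.len s = (s.toList.length : Int) := by
      intro s; simp
    have ha : ∀ j : Nat, j < i0 → d.contains (pvSfx sk j) = false := by
      intro j hj
      by_contra hcontra
      have hct : d.contains (pvSfx sk j) = true := by
        cases h : d.contains (pvSfx sk j) with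
        | false => exact absurd h hcontra
        | true => rfl
      have hk : pvSfx sk j ∈ d.keys := (PySem.Dict.contains_iff_mem_keys d _).mp hct
      have hsuf : (pvSfx sk j).toList <:+ cs := by
        rw [pvSfx_toList]; exact List.drop_suffix _ _
      have hcmem : pvSfx sk j ∈ candidates := (hmem _).mpr ⟨hk, hsuf⟩
      have hle := hbmax _ hcmem
      rw [hlen_s, hlen_s, hsfx_len j] at hle
      have : n - j ≤ lb := by exact_mod_cast hle
      omega
    have hb : d.contains (pvSfx sk i0) = true := by
      rw [hsfx_best]; exact (PySem.Dict.contains_iff_mem_keys d _).mpr hbk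
    rw [hrange, pvLoop_found d sk i0 (by rw [hi0, hn, hcs]; omega) ha hb 0 (by omega), hsfx_best]
    unfold pvAcore
    simp only [← hd, ← hcand, if_neg hc, hbest]

theorem resolve_target_file_name_spec : Claim_equal_resolve_target_file_name := by
  intro sk pn stems _
  unfold Spec_resolve_target_file_name resolve_target_file_name resolve_target_file_name_alt
  cases pn with
  | none => exact pvMain sk stems
  | some s =>
    by_cases h : s = "" <;> simp [h, pvMain sk stems]
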